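-- pv_equiv track=rewrite | github.com/aonebadal/Focus-Tracker | focus_tracker.py | _compress_scores
-- ===== SOURCE A (Python) =====
-- from typing import Dict, List, Optional, Tuple
--
-- def _compress_scores(scores: List[int], max_len: int = 1800):
--     if len(scores) <= max_len:
--         return [int(max(0, min(100, s))) for s in scores]
--
--     step = len(scores) / max_len
--     compact = []
--     for idx in range(max_len):
--         src_index = int(idx * step)
--         src_index = min(src_index, len(scores) - 1)
--         compact.append(int(max(0, min(100, scores[src_index]))))
--     return compact
-- ===== SOURCE B (Python) =====
-- def _compress_scores(scores, max_len=1800):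
--     n = len(scores)
--     if n <= max_len:
--         return [0 if s < 0 else 100 if s > 100 else s for s in scores]
--     step = n / max_len
--     out = []
--     idx = 0
--     for j, s in enumerate(scores):
--         c = 0 if s < 0 else 100 if s > 100 else s
--         while idx < max_len and min(int(idx * step), n - 1) == j:
--             out.append(c)
--             idx += 1
--     return out
-- ===== Notes on version B (the rewrite author's own statement) =====
-- stated objective: alternative
-- what changed: B replaces A's loop over output indices (each computing its own source index and clamping scores[src]) by a single two-pointer pass over the source list: each element is clamped once and emitted with its multiplicity, the output pointer advancing while its strided index still maps to the current element; correctness rests on the monotonicity of idx -> int(idx*step).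
import Mathlib
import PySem

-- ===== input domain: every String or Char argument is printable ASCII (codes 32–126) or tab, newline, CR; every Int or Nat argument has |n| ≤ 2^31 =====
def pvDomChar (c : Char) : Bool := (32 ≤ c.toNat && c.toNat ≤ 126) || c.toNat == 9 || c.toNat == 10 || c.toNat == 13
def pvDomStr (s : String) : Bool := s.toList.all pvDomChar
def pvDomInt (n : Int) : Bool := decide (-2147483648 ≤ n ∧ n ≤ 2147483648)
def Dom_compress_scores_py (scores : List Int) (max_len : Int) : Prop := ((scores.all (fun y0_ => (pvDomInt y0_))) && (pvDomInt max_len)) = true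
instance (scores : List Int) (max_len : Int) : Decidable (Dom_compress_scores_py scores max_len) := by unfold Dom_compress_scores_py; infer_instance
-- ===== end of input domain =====

-- B replaces A's per-output-index sampling loop by a single two-pointer pass over the
-- source list, emitting each clamped element once per output slot that maps to it
-- (objective: alternative decomposition; no speed claim).

-- Float helpers shared by both ports: Python's '/' on ints and '*' on int*float are IEEE-754
-- binary64 operations; pvRoundDouble models round-to-nearest-even at 53-bit precision
-- (exact for results in the normal binary64 range, which covers every input of Dom here),
-- and pvTrunc models int() on a float (truncation toward zero).
def pvTrunc (q : ℚ) : Int := q.num.tdiv q.den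

def pvRNE (x : ℚ) : Int :=  -- round to nearest integer, ties to even
  let f : Int := ⌊x⌋
  let r : ℚ := x - f
  if r < 1/2 then f else if 1/2 < r then f + 1 else if f % 2 = 0 then f else f + 1

def pvRoundDouble (q : ℚ) : ℚ :=  -- nearest binary64 value (ties to even)
  if q = 0 then 0
  else
    let u : ℚ := (2 : ℚ) ^ (Int.log 2 |q| - 52)  -- ulp: mantissa lands in [2^52, 2^53)
    (pvRNE (q / u) : ℚ) * u

def pvFDiv (a b : Int) : ℚ := pvRoundDouble ((a : ℚ) / (b : ℚ))  -- Python a / b on ints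
def pvFMul (i : Int) (q : ℚ) : ℚ := pvRoundDouble ((i : ℚ) * q)  -- Python i * f

-- ===== PORT A =====
-- A: short branch clamps everything; long branch builds 'compact' by appending clamped
-- strided picks. scores[src_index] is provably in range in every executed iteration, so
-- pyGetD's default is never used.
def compress_scores_py (scores : List Int) (max_len : Int) : List Int :=
  if (scores.length : Int) ≤ max_len then
    scores.map (fun s => max 0 (min 100 s))
  else
    let step : ℚ := pvFDiv (scores.length : Int) max_len
    (PySem.List.pyRange 0 max_len 1).foldl
      (fun compact idx =>
        let src : Int := pvTrunc (pvFMul idx step)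
        let src2 : Int := min src ((scores.length : Int) - 1)
        compact ++ [max 0 (min 100 (PySem.List.pyGetD scores src2 0))]) []

-- ===== PORT B =====
def pvClampB (s : Int) : Int := if s < 0 then 0 else if 100 < s then 100 else s

-- 'while idx < max_len and f(idx) == j: out.append(c); idx += 1' — fueled, faithful step
-- for step; the fuel (max_len - idx).toNat bounds the iteration count and is never exhausted.
def pvWhile (f : Int → Int) (maxl j c : Int) : Nat → Int → List Int → Int × List Int
  | 0, idx, out => (idx, out)
  | fuel+1, idx, out =>
    if idx < maxl ∧ f idx = j then pvWhile f maxl j c fuel (idx+1) (out ++ [c])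
    else (idx, out)

def compress_scores_py_alt (scores : List Int) (max_len : Int) : List Int :=
  let n : Int := scores.length
  if n ≤ max_len then
    scores.map pvClampB
  else
    let step : ℚ := pvFDiv n max_len
    let f : Int → Int := fun idx => min (pvTrunc (pvFMul idx step)) (n - 1)
    ((PySem.List.enumerate scores 0).foldl
      (fun (st : Int × List Int) p =>
        pvWhile f max_len p.1 (pvClampB p.2) (max_len - st.1).toNat st.1 st.2)
      (0, [])).2

-- ===== PRECONDITION & SPEC =====
-- Pre_ excludes exactly the inputs on which A raises ZeroDivisionError (non-empty scores
-- with max_len = 0); B raises there too.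
def Pre_compress_scores_py (scores : List Int) (max_len : Int) : Prop :=
  scores = [] ∨ max_len ≠ 0
instance (scores : List Int) (max_len : Int) : Decidable (Pre_compress_scores_py scores max_len) := by unfold Pre_compress_scores_py; infer_instance

def pvWitness_compress_scores_py : List Int × Int := ([5, 200, -3], 2)

def Spec_compress_scores_py (scores : List Int) (max_len : Int) (out : List Int) : Prop := out = compress_scores_py_alt scores max_len
instance (scores : List Int) (max_len : Int) (out : List Int) : Decidable (Spec_compress_scores_py scores max_len out) := by unfold Spec_compress_scores_py; infer_instance

-- ===== CLAIM (what is proved, stated in full; the proofs are below) =====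
def Claim_equal_compress_scores_py : Prop := ∀ (scores : List Int) (max_len : Int), Dom_compress_scores_py scores max_len → Pre_compress_scores_py scores max_len → Spec_compress_scores_py scores max_len (compress_scores_py scores max_len)

-- ===== LEMMAS AND PROOFS =====

-- clamping two ways
theorem pvClampB_eq (s : Int) : pvClampB s = max 0 (min 100 s) := by
  unfold pvClampB; split_ifs <;> omega

-- pvRNE is within the floor/ceil pair
theorem pvRNE_ge_floor (x : ℚ) : ⌊x⌋ ≤ pvRNE x := by
  unfold pvRNE; dsimp only; split_ifs <;> omega

theorem pvRNE_le_floor_add_one (x : ℚ) : pvRNE x ≤ ⌊x⌋ + 1 := by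
  unfold pvRNE; dsimp only; split_ifs <;> omega

theorem pvRNE_mono {x y : ℚ} (h : x ≤ y) : pvRNE x ≤ pvRNE y := by
  rcases lt_or_ge ⌊x⌋ ⌊y⌋ with hf | hf
  · calc pvRNE x ≤ ⌊x⌋ + 1 := pvRNE_le_floor_add_one x
      _ ≤ ⌊y⌋ := by omega
      _ ≤ pvRNE y := pvRNE_ge_floor y
  · have hfe : ⌊y⌋ = ⌊x⌋ := le_antisymm hf (Int.floor_le_floor h)
    have hr : x - (⌊x⌋ : ℚ) ≤ y - (⌊y⌋ : ℚ) := by rw [hfe]; linarith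
    unfold pvRNE; dsimp only; rw [hfe]
    split_ifs <;> first | omega | linarith

theorem pvTrunc_eq_floor {q : ℚ} (h : 0 ≤ q) : pvTrunc q = ⌊q⌋ := by
  unfold pvTrunc
  rw [Int.tdiv_eq_ediv_of_nonneg (Rat.num_nonneg.2 h)]
  conv_rhs => rw [← Rat.num_div_den q]
  rw [Rat.floor_intCast_div_natCast]

theorem pvRoundDouble_nonneg {q : ℚ} (h : 0 ≤ q) : 0 ≤ pvRoundDouble q := by
  unfold pvRoundDouble
  split_ifs with h0
  · exact le_refl 0
  · have hq : 0 < q := lt_of_le_of_ne h (Ne.symm h0)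
    have hu : (0:ℚ) < (2 : ℚ) ^ (Int.log 2 |q| - 52) := zpow_pos (by norm_num) _
    have : (0:ℤ) ≤ pvRNE (q / (2 : ℚ) ^ (Int.log 2 |q| - 52)) := by
      have := pvRNE_ge_floor (q / (2 : ℚ) ^ (Int.log 2 |q| - 52))
      have hnn : (0:ℚ) ≤ q / (2 : ℚ) ^ (Int.log 2 |q| - 52) := le_of_lt (div_pos hq hu)
      have := Int.floor_nonneg.2 hnn
      omega
    positivity

theorem pvRoundDouble_le_pow {x : ℚ} (hx : 0 < x) :
    pvRoundDouble x ≤ (2 : ℚ) ^ (Int.log 2 x + 1) := by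
  unfold pvRoundDouble
  rw [if_neg (ne_of_gt hx), abs_of_pos hx]
  have hu : (0:ℚ) < (2 : ℚ) ^ (Int.log 2 x - 52) := zpow_pos (by norm_num) _
  have hlt : x < (2 : ℚ) ^ (Int.log 2 x + 1) := by
    simpa using Int.lt_zpow_succ_log_self (b := 2) (by norm_num) x
  have hdiv : x / (2 : ℚ) ^ (Int.log 2 x - 52) < (2 : ℚ) ^ (53 : ℤ) := by
    rw [div_lt_iff₀ hu, ← zpow_add₀ (by norm_num : (2:ℚ) ≠ 0)]
    have : (53 : ℤ) + (Int.log 2 x - 52) = Int.log 2 x + 1 := by ring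
    rw [this]; exact hlt
  have hfl : ⌊x / (2 : ℚ) ^ (Int.log 2 x - 52)⌋ < (2:ℤ) ^ (53 : ℕ) := by
    apply Int.floor_lt.2
    calc x / (2 : ℚ) ^ (Int.log 2 x - 52) < (2 : ℚ) ^ (53 : ℤ) := hdiv
      _ = (((2:ℤ) ^ (53:ℕ) : ℤ) : ℚ) := by norm_num
  have hr : pvRNE (x / (2 : ℚ) ^ (Int.log 2 x - 52)) ≤ (2:ℤ) ^ (53 : ℕ) := by
    have := pvRNE_le_floor_add_one (x / (2 : ℚ) ^ (Int.log 2 x - 52))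
    omega
  calc (pvRNE (x / (2 : ℚ) ^ (Int.log 2 x - 52)) : ℚ) * (2 : ℚ) ^ (Int.log 2 x - 52)
      ≤ ((2:ℤ) ^ (53:ℕ) : ℚ) * (2 : ℚ) ^ (Int.log 2 x - 52) := by
        apply mul_le_mul_of_nonneg_right _ (le_of_lt hu)
        exact_mod_cast hr
    _ = (2 : ℚ) ^ (Int.log 2 x + 1) := by
        rw [show ((2:ℤ)^(53:ℕ) : ℚ) = (2:ℚ) ^ (53:ℤ) by norm_num,
            ← zpow_add₀ (by norm_num : (2:ℚ) ≠ 0)]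
        ring_nf

theorem pow_le_pvRoundDouble {y : ℚ} (hy : 0 < y) :
    (2 : ℚ) ^ (Int.log 2 y) ≤ pvRoundDouble y := by
  unfold pvRoundDouble
  rw [if_neg (ne_of_gt hy), abs_of_pos hy]
  have hu : (0:ℚ) < (2 : ℚ) ^ (Int.log 2 y - 52) := zpow_pos (by norm_num) _
  have hge : (2 : ℚ) ^ (Int.log 2 y) ≤ y := by
    simpa using Int.zpow_log_le_self (b := 2) (by norm_num) hy
  have hdiv : (2 : ℚ) ^ (52 : ℤ) ≤ y / (2 : ℚ) ^ (Int.log 2 y - 52) := by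
    rw [le_div_iff₀ hu, ← zpow_add₀ (by norm_num : (2:ℚ) ≠ 0)]
    have : (52 : ℤ) + (Int.log 2 y - 52) = Int.log 2 y := by ring
    rw [this]; exact hge
  have hfl : (2:ℤ) ^ (52 : ℕ) ≤ ⌊y / (2 : ℚ) ^ (Int.log 2 y - 52)⌋ := by
    apply Int.le_floor.2
    calc ((2:ℤ)^(52:ℕ) : ℚ) = (2 : ℚ) ^ (52 : ℤ) := by norm_num
      _ ≤ _ := hdiv
  have hr : (2:ℤ) ^ (52 : ℕ) ≤ pvRNE (y / (2 : ℚ) ^ (Int.log 2 y - 52)) := by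
    have := pvRNE_ge_floor (y / (2 : ℚ) ^ (Int.log 2 y - 52))
    omega
  calc (2 : ℚ) ^ (Int.log 2 y)
      = ((2:ℤ)^(52:ℕ) : ℚ) * (2 : ℚ) ^ (Int.log 2 y - 52) := by
        rw [show ((2:ℤ)^(52:ℕ) : ℚ) = (2:ℚ) ^ (52:ℤ) by norm_num,
            ← zpow_add₀ (by norm_num : (2:ℚ) ≠ 0)]
        ring_nf
    _ ≤ (pvRNE (y / (2 : ℚ) ^ (Int.log 2 y - 52)) : ℚ) * (2 : ℚ) ^ (Int.log 2 y - 52) := by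
        apply mul_le_mul_of_nonneg_right _ (le_of_lt hu)
        exact_mod_cast hr

-- monotonicity of rounding on the nonnegatives
theorem pvRoundDouble_mono {x y : ℚ} (hx : 0 ≤ x) (h : x ≤ y) :
    pvRoundDouble x ≤ pvRoundDouble y := by
  rcases eq_or_lt_of_le hx with hx0 | hxp
  · rw [← hx0]
    have : pvRoundDouble 0 = 0 := by unfold pvRoundDouble; simp
    rw [this]
    exact pvRoundDouble_nonneg (le_trans hx h)
  · have hyp : 0 < y := lt_of_lt_of_le hxp h
    have hlog : Int.log 2 x ≤ Int.log 2 y := Int.log_mono_right hxp h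
    rcases eq_or_lt_of_le hlog with heq | hlt
    · -- same exponent, same ulp: monotone by pvRNE_mono
      unfold pvRoundDouble
      rw [if_neg (ne_of_gt hxp), if_neg (ne_of_gt hyp), abs_of_pos hxp, abs_of_pos hyp, ← heq]
      have hu : (0:ℚ) < (2 : ℚ) ^ (Int.log 2 x - 52) := zpow_pos (by norm_num) _
      apply mul_le_mul_of_nonneg_right _ (le_of_lt hu)
      exact_mod_cast pvRNE_mono (div_le_div_of_nonneg_right h hu.le)
    · -- exponent grows: x rounds below 2^(e₁+1) ≤ 2^e₂ ≤ rounded y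
      calc pvRoundDouble x ≤ (2 : ℚ) ^ (Int.log 2 x + 1) := pvRoundDouble_le_pow hxp
        _ ≤ (2 : ℚ) ^ (Int.log 2 y) := by
            apply zpow_le_zpow_right₀ (by norm_num) (by omega)
        _ ≤ pvRoundDouble y := pow_le_pvRoundDouble hyp

-- the source-index map of the long branch is monotone and lands in [0, n)
theorem pvFMul_mono {a b : Int} (step : ℚ) (ha : 0 ≤ a) (hab : a ≤ b) (hs : 0 ≤ step) :
    pvFMul a step ≤ pvFMul b step := by
  unfold pvFMul
  apply pvRoundDouble_mono (mul_nonneg (by exact_mod_cast ha) hs)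
  apply mul_le_mul_of_nonneg_right _ hs
  exact_mod_cast hab

theorem pvTrunc_mono {x y : ℚ} (hx : 0 ≤ x) (h : x ≤ y) : pvTrunc x ≤ pvTrunc y := by
  rw [pvTrunc_eq_floor hx, pvTrunc_eq_floor (le_trans hx h)]
  exact Int.floor_le_floor h

-- pvWhile unwinds to an appended run of equal elements
theorem pvWhile_spec (f : Int → Int) (maxl j c : Int) :
    ∀ (fuel : Nat) (idx : Int) (out : List Int), (maxl - idx).toNat ≤ fuel →
    ∃ idx', pvWhile f maxl j c fuel idx out
              = (idx', out ++ List.replicate (idx' - idx).toNat c)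
      ∧ idx ≤ idx'
      ∧ (∀ i, idx ≤ i → i < idx' → (i < maxl ∧ f i = j))
      ∧ ¬(idx' < maxl ∧ f idx' = j) := by
  intro fuel
  induction fuel with
  | zero =>
    intro idx out hf
    refine ⟨idx, by simp [pvWhile], le_refl idx, by omega, by omega⟩
  | succ fuel ih =>
    intro idx out hf
    by_cases hc : idx < maxl ∧ f idx = j
    · obtain ⟨idx', heq, hle, hall, hstop⟩ := ih (idx+1) (out ++ [c]) (by omega)
      refine ⟨idx', ?_, by omega, ?_, hstop⟩
      · rw [pvWhile, if_pos hc, heq]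
        congr 1
        rw [List.append_assoc]
        congr 1
        have h1 : (idx' - idx).toNat = (idx' - (idx+1)).toNat + 1 := by omega
        rw [h1, List.replicate_succ]
        rfl
      · intro i h1 h2
        rcases eq_or_lt_of_le h1 with rfl | h1'
        · exact ⟨hc.1, hc.2⟩
        · exact hall i (by omega) h2
    · exact ⟨idx, by rw [pvWhile, if_neg hc]; simp, le_refl idx, by omega, hc⟩

-- the two-pointer scan over the tail of scores produces exactly the strided picks
theorem pvScan_spec (scores : List Int) (maxl : Int) (f : Int → Int)
    (hmono : ∀ a b : Int, 0 ≤ a → a ≤ b → b < maxl → f a ≤ f b)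
    (hrng : ∀ i : Int, 0 ≤ i → i < maxl → 0 ≤ f i ∧ f i < (scores.length : Int)) :
    ∀ (l : List Int) (m : Nat) (idx : Int) (out : List Int),
      l = scores.drop m →
      0 ≤ idx →
      (idx < maxl → (m : Int) ≤ f idx) →
      ((PySem.List.enumerate l (m : Int)).foldl
        (fun (st : Int × List Int) p =>
          pvWhile f maxl p.1 (pvClampB p.2) (maxl - st.1).toNat st.1 st.2)
        (idx, out)).2
      = out ++ (PySem.List.pyRange idx maxl 1).map
          (fun i => pvClampB (PySem.List.pyGetD scores (f i) 0)) := by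
  intro l
  induction l with
  | nil =>
    intro m idx out hl hidx hlow
    have hm : scores.length ≤ m := by
      by_contra hm
      have := congrArg List.length hl
      simp [List.length_drop] at this
      omega
    have hstop : maxl ≤ idx := by
      by_contra hlt
      push_neg at hlt
      have h1 := (hrng idx hidx hlt).2
      have h2 := hlow hlt
      omega
    rw [PySem.List.pyRange_one_eq_nil hstop]
    simp [PySem.List.enumerate_nil]
  | cons s l' ih =>
    intro m idx out hl hidx hlow
    have hmlen : m < scores.length := by
      by_contra hm
      push_neg at hm
      rw [List.drop_eq_nil_of_le hm] at hl
      exact (List.cons_ne_nil s l') hl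
    have hs : PySem.List.pyGetD scores (m : Int) 0 = s := by
      have h0 : (scores.drop m)[0]'(by rw [← hl]; simp) = s := by
        simp [← hl]
      rw [List.getElem_drop] at h0
      simp only [Nat.add_zero] at h0
      rw [PySem.List.pyGetD_natCast]
      simp [List.getD, List.getElem?_eq_getElem hmlen, h0]
    rw [PySem.List.enumerate_cons, List.foldl_cons]
    obtain ⟨idx', heq, hle, hall, hstop⟩ :=
      pvWhile_spec f maxl (m : Int) (pvClampB s) (maxl - idx).toNat idx out (le_refl _)
    dsimp only at heq ⊢
    rw [heq]
    have hidx' : 0 ≤ idx' := le_trans hidx hle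
    have hlow' : idx' < maxl → ((m+1 : Nat) : Int) ≤ f idx' := by
      intro hlt
      have hne : f idx' ≠ (m : Int) := fun h => hstop ⟨hlt, h⟩
      have hge : (m : Int) ≤ f idx' := by
        rcases eq_or_lt_of_le hle with rfl | hlt'
        · exact hlow hlt
        · have h1 := (hall (idx' - 1) (by omega) (by omega)).2
          have h2 := hmono (idx' - 1) idx' (by omega) (by omega) hlt
          omega
      push_cast
      omega
    have hdrop : l' = scores.drop (m + 1) := by
      have := congrArg (List.drop 1) hl
      simpa [List.drop_drop, Nat.add_comm] using this
    have := ih (m + 1) idx' (out ++ List.replicate (idx' - idx).toNat (pvClampB s))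
      hdrop hidx' hlow'
    rw [show ((m : Int) + 1) = ((m + 1 : Nat) : Int) by push_cast; ring, this]
    -- stitch: the emitted run is the map over [idx, idx')
    rcases eq_or_lt_of_le hle with rfl | hlt
    · simp
    · have hmaxl : idx' ≤ maxl := by
        have := (hall (idx' - 1) (by omega) (by omega)).1
        omega
      rw [PySem.List.pyRange_one_append idx idx' maxl hle hmaxl, List.map_append,
        List.append_assoc]
      congr 2
      have hconst : ∀ i ∈ PySem.List.pyRange idx idx' 1,
          pvClampB (PySem.List.pyGetD scores (f i) 0) = pvClampB s := by
        intro i hi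
        rw [PySem.List.mem_pyRange_one] at hi
        rw [(hall i hi.1 hi.2).2, hs]
      rw [List.map_congr_left hconst, List.map_const', PySem.List.length_pyRange_one]

-- A's append-in-a-loop over a range is a map over that range.
theorem pv_foldl_is_map (l : List Int) (g : Int → Int) :
    l.foldl (fun acc i => acc ++ [g i]) [] = l.map g := by
  simpa using PySem.List.foldl_append_singleton_eq_map g l []

-- ===== VERDICT (by name: the statement is the Claim_ definition above) =====
theorem compress_scores_py_spec : Claim_equal_compress_scores_py := by
  intro scores max_len _hdom hpre
  unfold Spec_compress_scores_py compress_scores_py compress_scores_py_alt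
  by_cases h : (scores.length : Int) ≤ max_len
  · -- short case: both clamp elementwise
    simp only [if_pos h]
    exact (List.map_congr_left fun s _ => (pvClampB_eq s).symm)
  · -- long case
    simp only [if_neg h]
    push_neg at h
    set n : Int := (scores.length : Int) with hndef
    set step : ℚ := pvFDiv n max_len with hstepdef
    set f : Int → Int := fun idx => min (pvTrunc (pvFMul idx step)) (n - 1) with hfdef
    have hstepnn : 0 < max_len → 0 ≤ step := by
      intro hml
      rw [hstepdef]
      unfold pvFDiv
      apply pvRoundDouble_nonneg
      apply div_nonneg
      · rw [hndef]; positivity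
      · exact_mod_cast le_of_lt hml
    have hTnn : 0 < max_len → ∀ i : Int, 0 ≤ i → 0 ≤ pvTrunc (pvFMul i step) := by
      intro hml i hi
      have hnn : (0:ℚ) ≤ pvFMul i step := by
        unfold pvFMul
        exact pvRoundDouble_nonneg (mul_nonneg (by exact_mod_cast hi) (hstepnn hml))
      rw [pvTrunc_eq_floor hnn]
      exact Int.floor_nonneg.2 hnn
    have hmono : ∀ a b : Int, 0 ≤ a → a ≤ b → b < max_len → f a ≤ f b := by
      intro a b ha hab hb
      have hml : 0 < max_len := by omega
      rw [hfdef]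
      dsimp only
      refine min_le_min ?_ le_rfl
      apply pvTrunc_mono
      · unfold pvFMul
        exact pvRoundDouble_nonneg (mul_nonneg (by exact_mod_cast ha) (hstepnn hml))
      · exact pvFMul_mono step ha hab (hstepnn hml)
    have hrng : ∀ i : Int, 0 ≤ i → i < max_len → 0 ≤ f i ∧ f i < n := by
      intro i hi hilt
      have hml : 0 < max_len := by omega
      have hn2 : 2 ≤ n := by omega
      rw [hfdef]
      dsimp only
      constructor
      · exact le_min (hTnn hml i hi) (by omega)
      · calc min (pvTrunc (pvFMul i step)) (n - 1) ≤ n - 1 := min_le_right _ _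
          _ < n := by omega
    have hscan := pvScan_spec scores max_len f hmono (by rw [← hndef]; exact hrng)
      scores 0 0 [] (by simp) le_rfl
      (fun hlt => by simpa using (hrng 0 le_rfl hlt).1)
    rw [pv_foldl_is_map]
    rw [show ((0:Nat) : Int) = (0:Int) from rfl] at hscan
    rw [hscan]
    simp only [List.nil_append]
    apply List.map_congr_left
    intro i _
    rw [pvClampB_eq]
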